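-- pv_equiv track=rewrite | github.com/Kamuie99/TIL | 02.Python/98. Test_Practice/problem06.py | is_id_valid
-- ===== SOURCE A (Python) =====
-- def is_id_valid(user):
--     id = user['id']
--     #-------- test_case_01 --------#
--     # try:
--     #     if int(id[-1]):
--     #         return True
--     # except ValueError:
--     #     return False
--     #-------- test_case_02 --------#
--     number = []
--     for i in range(10):
--         number.append(str(i))
--     if id[-1] in number:
--         return True
--     else:
--         return False
-- ===== SOURCE B (Python) =====
-- def is_id_valid(user):
--     id = user['id']
--     return id != id.rstrip('0123456789')
-- ===== Notes on version B (the rewrite author's own statement) =====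
-- stated objective: simpler
-- what changed: Instead of building a 10-element list of digit strings and scanning it for the last character, B strips trailing ASCII digits with rstrip('0123456789') and reports whether that changed the string.
import Mathlib
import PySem

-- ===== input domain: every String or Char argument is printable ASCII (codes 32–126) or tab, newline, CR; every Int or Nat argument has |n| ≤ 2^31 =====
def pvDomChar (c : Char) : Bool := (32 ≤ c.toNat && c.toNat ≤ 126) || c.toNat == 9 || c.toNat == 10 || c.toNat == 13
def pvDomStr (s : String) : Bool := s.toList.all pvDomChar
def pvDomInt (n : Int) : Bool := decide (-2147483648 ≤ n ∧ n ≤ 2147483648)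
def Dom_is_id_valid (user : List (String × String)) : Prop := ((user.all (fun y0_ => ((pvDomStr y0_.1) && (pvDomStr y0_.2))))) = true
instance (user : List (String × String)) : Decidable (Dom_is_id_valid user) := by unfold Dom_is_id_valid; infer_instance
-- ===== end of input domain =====

-- B drops A's loop-built table of digit strings and its membership scan: it strips
-- trailing ASCII digits with rstrip('0123456789') and reports whether the string changed
-- (objective: simpler).

-- ===== PORT A =====
def is_id_valid (user : List (String × String)) : Bool :=
  match (PySem.Dict.mk user).get? "id" with
  | none => false            -- KeyError, excluded by Pre_
  | some id =>
    -- number = []; for i in range(10): number.append(str(i))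
    let number : List String :=
      (PySem.List.pyRange 0 10 1).foldl (fun acc i => acc ++ [PySem.Int.toStr i]) []
    match PySem.Str.pyGet? id (-1) with
    | none => false          -- IndexError on empty id, excluded by Pre_
    | some c => if number.contains (String.ofList [c]) then true else false

-- ===== PORT B =====
-- PySem has no rstrip-with-chars primitive, so `s.rstrip('0123456789')` is ported by
-- hand: drop from the right every character of the given set (exact CPython semantics).
def pvRstripDigits (cs : List Char) : List Char :=
  ((cs.reverse).dropWhile (fun c => ("0123456789".toList).contains c)).reverse

def is_id_valid_alt (user : List (String × String)) : Bool :=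
  match (PySem.Dict.mk user).get? "id" with
  | none => false            -- KeyError (B's Python raises here too), excluded by Pre_
  | some id => !(id.toList == pvRstripDigits id.toList)

-- ===== PRECONDITION & SPEC =====
-- Pre_ excludes exactly the inputs on which A raises: a missing 'id' key (KeyError)
-- or an empty 'id' value (IndexError on id[-1]).
def Pre_is_id_valid (user : List (String × String)) : Prop :=
  ((PySem.Dict.mk user).get? "id").getD "" ≠ ""
instance (user : List (String × String)) : Decidable (Pre_is_id_valid user) := by
  unfold Pre_is_id_valid; infer_instance
def pvWitness_is_id_valid : (List (String × String)) := [("id", "abc7")]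

def Spec_is_id_valid (user : List (String × String)) (out : Bool) : Prop := out = is_id_valid_alt user
instance (user : List (String × String)) (out : Bool) : Decidable (Spec_is_id_valid user out) := by unfold Spec_is_id_valid; infer_instance

-- ===== CLAIM (what is proved, stated in full; the proofs are below) =====
def Claim_equal_is_id_valid : Prop := ∀ (user : List (String × String)), Dom_is_id_valid user → Pre_is_id_valid user → Spec_is_id_valid user (is_id_valid user)

-- ===== LEMMAS AND PROOFS =====

-- A's loop-built table is the ten digit strings.
theorem pv_number_eval :
    (PySem.List.pyRange 0 10 1).foldl (fun acc i => acc ++ [PySem.Int.toStr i]) []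
      = ["0","1","2","3","4","5","6","7","8","9"] := by decide

-- Membership of the one-character string in A's table is membership of the character
-- in B's strip set.
theorem pv_mem_digits (c : Char) :
    (["0","1","2","3","4","5","6","7","8","9"] : List String).contains (String.ofList [c])
      = ("0123456789".toList).contains c := by
  have h : ∀ d : Char, (String.ofList [c] == String.ofList [d]) = (c == d) := by
    intro d
    apply Bool.eq_iff_iff.mpr
    simp [String.ofList_inj]
  simp only [List.contains_cons, List.contains_nil, Bool.or_false,
    show ("0":String) = String.ofList ['0'] from rfl,
    show ("1":String) = String.ofList ['1'] from rfl,
    show ("2":String) = String.ofList ['2'] from rfl,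
    show ("3":String) = String.ofList ['3'] from rfl,
    show ("4":String) = String.ofList ['4'] from rfl,
    show ("5":String) = String.ofList ['5'] from rfl,
    show ("6":String) = String.ofList ['6'] from rfl,
    show ("7":String) = String.ofList ['7'] from rfl,
    show ("8":String) = String.ofList ['8'] from rfl,
    show ("9":String) = String.ofList ['9'] from rfl, h,
    show ("0123456789".toList) = ['0','1','2','3','4','5','6','7','8','9'] from rfl]

-- xs[-1] on a list ending in `a` is `a`.
theorem pv_pyGet_last {α : Type} (xs : List α) (a : α) :
    PySem.List.pyGet? (xs ++ [a]) (-1) = some a := by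
  simp [PySem.List.pyGet?, PySem.List.pyIdx?]

-- Stripping trailing characters satisfying p changes the list iff the last character satisfies p.
theorem pv_strip_changed_gen (p : Char → Bool) (rs : List Char) (a : Char) :
    (!((rs.reverse ++ [a]) == (((rs.reverse ++ [a]).reverse).dropWhile p).reverse)) = p a := by
  have h1 : (rs.reverse ++ [a]).reverse = a :: rs := by simp
  rw [h1, List.dropWhile_cons]
  cases hp : p a
  · rw [if_neg (by simp)]
    simp
  · rw [if_pos rfl]
    have hne : rs.reverse ++ [a] ≠ (rs.dropWhile p).reverse := by
      intro h
      have hlen := congrArg List.length h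
      have hd := List.length_dropWhile_le p rs
      simp at hlen
      omega
    simp [hne]

theorem pv_rstrip_changed (rs : List Char) (a : Char) :
    (!((rs.reverse ++ [a]) == pvRstripDigits (rs.reverse ++ [a])))
      = ("0123456789".toList).contains a := by
  unfold pvRstripDigits
  exact pv_strip_changed_gen _ rs a

-- ===== VERDICT (by name: the statement is the Claim_ definition above) =====
theorem is_id_valid_spec : Claim_equal_is_id_valid := by
  intro user _ hpre
  unfold Spec_is_id_valid is_id_valid is_id_valid_alt
  unfold Pre_is_id_valid at hpre
  cases hid : (PySem.Dict.mk user).get? "id" with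
  | none => rfl
  | some id =>
    rw [hid] at hpre
    have hne : id.toList ≠ [] := by
      intro h
      apply hpre
      simp only [Option.getD_some]
      have : id = "" := by
        have := congrArg String.ofList h
        simpa using this
      exact this
    obtain ⟨a, rs, hr⟩ : ∃ a rs, id.toList.reverse = a :: rs := by
      cases h : id.toList.reverse with
      | nil => exact absurd (by simpa using congrArg List.reverse h) hne
      | cons a rs => exact ⟨a, rs, rfl⟩
    have hsplit : id.toList = rs.reverse ++ [a] := by
      have := congrArg List.reverse hr
      simpa using this
    simp only [pv_number_eval, PySem.Str.pyGet?_eq, PySem.Chars.pyGet?_eq_listPyGet?,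
      hsplit, pv_pyGet_last, pv_mem_digits, pv_rstrip_changed]
    cases ("0123456789".toList).contains a <;> simp
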